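-- pv_equiv track=rewrite | github.com/Yidhar/Embla_System | scripts/check_legacy_shim_imports_ws28_030.py | _module_is_legacy
-- ===== SOURCE A (Python) =====
-- LEGACY_SHIM_MODULES = (
--     "system.global_mutex",
--     "system.policy_firewall",
--     "system.watchdog_daemon",
--     "system.brainstem_supervisor",
--     "autonomous.event_log.event_schema",
--     "autonomous.event_log.event_store",
--     "autonomous.event_log.topic_event_bus",
-- )
--
-- def _module_is_legacy(module_name: str) -> bool:
--     normalized = str(module_name or "").strip()
--     if not normalized:
--         return False
--     for legacy in LEGACY_SHIM_MODULES:
--         if normalized == legacy or normalized.startswith(f"{legacy}."):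
--             return True
--     return False
-- ===== SOURCE B (Python) =====
-- LEGACY_SHIM_MODULES = (
--     "system.global_mutex",
--     "system.policy_firewall",
--     "system.watchdog_daemon",
--     "system.brainstem_supervisor",
--     "autonomous.event_log.event_schema",
--     "autonomous.event_log.event_store",
--     "autonomous.event_log.topic_event_bus",
-- )
--
-- _LEGACY_SET = frozenset(LEGACY_SHIM_MODULES)
--
-- def _module_is_legacy(module_name: str) -> bool:
--     normalized = str(module_name or "").strip()
--     if not normalized:
--         return False
--     prefix = ""
--     for ch in normalized:
--         if ch == "." and prefix in _LEGACY_SET: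
--             return True
--         prefix += ch
--     return prefix in _LEGACY_SET
-- ===== Notes on version B (the rewrite author's own statement) =====
-- stated objective: alternative
-- what changed: Instead of scanning the fixed tuple of legacy names and testing equality/startswith against each, B makes one pass over the module name's characters, testing the accumulated dotted prefix against a frozenset at every dot boundary and once at the end.
import Mathlib
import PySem

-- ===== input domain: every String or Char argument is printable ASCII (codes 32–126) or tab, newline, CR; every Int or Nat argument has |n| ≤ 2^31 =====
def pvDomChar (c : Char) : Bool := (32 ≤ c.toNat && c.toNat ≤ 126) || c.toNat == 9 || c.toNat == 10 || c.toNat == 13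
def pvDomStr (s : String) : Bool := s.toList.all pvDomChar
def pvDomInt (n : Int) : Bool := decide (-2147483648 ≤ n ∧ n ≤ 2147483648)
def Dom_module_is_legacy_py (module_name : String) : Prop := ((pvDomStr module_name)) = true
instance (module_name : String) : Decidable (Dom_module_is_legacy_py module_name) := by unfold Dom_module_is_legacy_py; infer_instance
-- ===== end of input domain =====

-- B replaces A's scan over the fixed legacy-name tuple by a single pass over the
-- module name that checks the accumulated dotted prefix against a frozenset at each
-- '.' boundary (and the whole name at the end); alternative structure, same results.


-- ===== PORT A =====
def pvLegacyShimModules : List String :=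
  [ "system.global_mutex",
    "system.policy_firewall",
    "system.watchdog_daemon",
    "system.brainstem_supervisor",
    "autonomous.event_log.event_schema",
    "autonomous.event_log.event_store",
    "autonomous.event_log.topic_event_bus" ]

-- the 'for legacy in LEGACY_SHIM_MODULES' loop with its early return True
def pvALoop (normalized : String) : List String → Bool
  | [] => false
  | legacy :: rest =>
      if normalized == legacy || PySem.Str.startswith normalized (legacy ++ ".") then true
      else pvALoop normalized rest

def module_is_legacy_py (module_name : String) : Bool :=
  let normalized := PySem.Str.strip module_name
  if normalized = "" then false
  else pvALoop normalized pvLegacyShimModules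

-- ===== PORT B =====
-- frozenset(LEGACY_SHIM_MODULES); strings kept as their char lists (PySem's string carrier)
def pvLegacySet : PySem.Set (List Char) :=
  PySem.Set.ofList (pvLegacyShimModules.map String.toList)

-- the 'for ch in normalized' loop; 'prefix' is the accumulated char list (exact: Python
-- string concatenation of single chars = appending the char)
def pvAltGo (pre : List Char) : List Char → Bool
  | [] => pvLegacySet.contains pre
  | c :: rest =>
      if c == '.' && pvLegacySet.contains pre then true
      else pvAltGo (pre ++ [c]) rest

def module_is_legacy_py_alt (module_name : String) : Bool :=
  let normalized := PySem.Str.strip module_name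
  if normalized = "" then false
  else pvAltGo [] normalized.toList

-- ===== PRECONDITION & SPEC =====
def Spec_module_is_legacy_py (module_name : String) (out : Bool) : Prop := out = module_is_legacy_py_alt module_name
instance (module_name : String) (out : Bool) : Decidable (Spec_module_is_legacy_py module_name out) := by unfold Spec_module_is_legacy_py; infer_instance

-- ===== CLAIM (what is proved, stated in full; the proofs are below) =====
def Claim_equal_module_is_legacy_py : Prop := ∀ (module_name : String), Dom_module_is_legacy_py module_name → Spec_module_is_legacy_py module_name (module_is_legacy_py module_name)

-- ===== LEMMAS AND PROOFS =====

-- both ports guard with 'if … then true else …' on a Bool condition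
lemma pvIfBool (c r : Bool) : (if c = true then true else r) = true ↔ c = true ∨ r = true := by
  cases c <;> simp

-- A's loop returns True iff some legacy name equals n or is a dot-terminated prefix of n
lemma pvALoop_iff (n : String) (L : List String) :
    pvALoop n L = true ↔
      ∃ l ∈ L, n.toList = l.toList ∨ ∃ q, n.toList = l.toList ++ '.' :: q := by
  induction L with
  | nil => simp [pvALoop]
  | cons l rest ih =>
      have h1 : (n == l) = true ↔ n.toList = l.toList := by
        rw [beq_iff_eq, String.ext_iff]
      have h2 : PySem.Str.startswith n (l ++ ".") = true ↔
          ∃ q, n.toList = l.toList ++ '.' :: q := by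
        rw [PySem.Str.startswith_eq, PySem.Chars.startswith_iff]
        constructor
        · rintro ⟨t, ht⟩
          refine ⟨t, ?_⟩
          simp only [String.toList_append] at ht
          simpa using ht.symm
        · rintro ⟨q, hq⟩
          refine ⟨q, ?_⟩
          simp [hq]
      simp only [pvALoop]
      rw [pvIfBool, Bool.or_eq_true, List.exists_mem_cons_iff, ih, h1, h2]

-- B's loop returns True iff the remaining input has a dot such that everything
-- accumulated before it is legacy, or the whole accumulated string is legacy
lemma pvAltGo_iff (rest pre : List Char) :
    pvAltGo pre rest = true ↔
      (∃ p q, rest = p ++ '.' :: q ∧ (pre ++ p) ∈ pvLegacySet) ∨ (pre ++ rest) ∈ pvLegacySet := by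
  induction rest generalizing pre with
  | nil =>
      simp only [pvAltGo, PySem.Set.contains_iff, List.append_nil]
      constructor
      · exact fun h => Or.inr h
      · rintro (⟨p, q, hpq, _⟩ | h)
        · exact absurd hpq (by simp)
        · exact h
  | cons c rest ih =>
      simp only [pvAltGo]
      rw [pvIfBool, Bool.and_eq_true, ih]
      constructor
      · rintro (⟨hdot, hmem⟩ | (⟨p, q, hpq, hmem⟩ | hmem))
        · exact Or.inl ⟨[], rest, by simp [eq_of_beq hdot],
            by simpa using (PySem.Set.contains_iff _ _).mp hmem⟩
        · exact Or.inl ⟨c :: p, q, by simp [hpq], by simpa [List.append_assoc] using hmem⟩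
        · exact Or.inr (by simpa [List.append_assoc] using hmem)
      · rintro (⟨p, q, hpq, hmem⟩ | hmem)
        · cases p with
          | nil =>
              injection hpq with hc hrest
              subst hc; subst hrest
              exact Or.inl ⟨rfl, (PySem.Set.contains_iff _ _).mpr (by simpa using hmem)⟩
          | cons c' p' =>
              injection hpq with hc hrest
              subst hc; subst hrest
              exact Or.inr (Or.inl ⟨p', q, rfl, by simpa [List.append_assoc] using hmem⟩)
        · exact Or.inr (Or.inr (by simpa [List.append_assoc] using hmem))

-- membership in the frozenset = being the char list of one of the legacy names
lemma pvLegacySet_mem (x : List Char) :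
    x ∈ pvLegacySet ↔ ∃ l ∈ pvLegacyShimModules, l.toList = x := by
  simp [pvLegacySet, PySem.Set.mem_ofList, List.mem_map]

lemma pvLoops_agree (n : String) :
    pvALoop n pvLegacyShimModules = pvAltGo [] n.toList := by
  apply Bool.eq_iff_iff.mpr
  rw [pvALoop_iff, pvAltGo_iff]
  simp only [List.nil_append]
  constructor
  · rintro ⟨l, hl, he | ⟨q, hq⟩⟩
    · exact Or.inr ((pvLegacySet_mem _).mpr ⟨l, hl, he.symm⟩)
    · exact Or.inl ⟨l.toList, q, hq, (pvLegacySet_mem _).mpr ⟨l, hl, rfl⟩⟩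
  · rintro (⟨p, q, hpq, hmem⟩ | hmem)
    · rcases (pvLegacySet_mem _).mp hmem with ⟨l, hl, rfl⟩
      exact ⟨l, hl, Or.inr ⟨q, hpq⟩⟩
    · rcases (pvLegacySet_mem _).mp hmem with ⟨l, hl, he⟩
      exact ⟨l, hl, Or.inl he.symm⟩

-- ===== VERDICT (by name: the statement is the Claim_ definition above) =====
theorem module_is_legacy_py_spec : Claim_equal_module_is_legacy_py := by
  intro module_name _
  unfold Spec_module_is_legacy_py module_is_legacy_py module_is_legacy_py_alt
  by_cases h : PySem.Str.strip module_name = ""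
  · simp [h]
  · simp only [h, if_false]
    exact pvLoops_agree _
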